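-- pv_equiv track=rewrite | github.com/hernan-erasmo/discoursegraphs | src/discoursegraphs/discoursegraph.py | __walk_chain
-- ===== SOURCE A (Python) =====
-- def __walk_chain(rel_dict, from_id):
--     """
--     given a dict of pointing relations and a start node, this function
--     will return a list of paths (each path is represented as a list of
--     node IDs -- from the first node of the path to the last).
--
--     Parameters
--     ----------
--     rel_dict : dict
--         a dictionary mapping from an edge source node (node ID str)
--         to a set of edge target nodes (node ID str)
--     from_id : str
--
--     Returns
--     -------
--     paths_starting_with_id : list of list of str
--         each list constains a list of strings (i.e. a list of node IDs,
--         which represent a chain of pointing relations)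
--     """
--     paths_starting_with_id = []
--     for to_id in rel_dict[from_id]:
--         if to_id in rel_dict:
--             for tail in __walk_chain(rel_dict, to_id):
--                 paths_starting_with_id.append([from_id] + tail)
--         else:
--             paths_starting_with_id.append([from_id, to_id])
--     return paths_starting_with_id
-- ===== SOURCE B (Python) =====
-- def __walk_chain(rel_dict, from_id):
--     # Iterative DFS with an explicit stack of partial paths (no recursion).
--     paths = []
--     stack = [[from_id]]
--     while stack:
--         path = stack.pop()
--         last = path[-1]
--         if len(path) > 1 and last not in rel_dict:
--             paths.append(path)
--         else:
--             # raises KeyError for a missing start node, exactly like rel_dict[from_id]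
--             for to_id in list(rel_dict[last])[::-1]:
--                 stack.append(path + [to_id])
--     return paths
-- ===== Notes on version B (the rewrite author's own statement) =====
-- stated objective: alternative
-- what changed: Replaces A's recursion (which maps a cons over every recursively returned tail at every level) by an iterative DFS over an explicit stack of partial paths, emitting each completed path once.
import Mathlib
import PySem

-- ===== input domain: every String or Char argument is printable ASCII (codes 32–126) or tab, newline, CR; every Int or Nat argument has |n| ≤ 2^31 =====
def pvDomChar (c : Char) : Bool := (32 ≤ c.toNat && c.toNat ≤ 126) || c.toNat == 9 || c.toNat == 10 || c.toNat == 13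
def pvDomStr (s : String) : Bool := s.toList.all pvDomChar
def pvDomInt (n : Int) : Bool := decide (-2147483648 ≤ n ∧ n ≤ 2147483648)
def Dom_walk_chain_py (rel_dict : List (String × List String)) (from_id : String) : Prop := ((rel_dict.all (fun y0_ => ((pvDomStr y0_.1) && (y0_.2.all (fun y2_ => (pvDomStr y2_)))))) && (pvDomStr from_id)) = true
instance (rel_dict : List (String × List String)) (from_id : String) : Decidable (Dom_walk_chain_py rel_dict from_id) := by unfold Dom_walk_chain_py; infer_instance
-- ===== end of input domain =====

-- B replaces A's recursive DFS by an iterative traversal over an explicit stack of partial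
-- paths (a different decomposition of the same enumeration; not claimed faster).

-- ===== PORT A =====
-- Recursion of A, with fuel as a totality guard; under Pre_ (start key present, no
-- reachable cycle) the recursion depth is at most the number of keys, so the fuel
-- rel_dict.length + 1 is never exhausted.
def wkA (d : PySem.Dict String (List String)) : Nat → String → List (List String)
  | 0, _ => []
  | f + 1, u =>
      (PySem.Dict.getD d u []).foldl
        (fun acc t =>
          if PySem.Dict.contains d t then acc ++ (wkA d f t).map (fun tail => u :: tail)
          else acc ++ [[u, t]]) []

def walk_chain_py (rel_dict : List (String × List String)) (from_id : String) : List (List String) :=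
  wkA (PySem.Dict.ofList rel_dict) (rel_dict.length + 1) from_id

-- ===== PORT B =====
-- total length of all value lists, +2; bounds the number of children pushed per step
def wkC (d : PySem.Dict String (List String)) : Nat :=
  (d.values.map List.length).sum + 2

-- used by the termination argument of wkBloop
theorem wkC_targets_lt (d : PySem.Dict String (List String)) (k : String) :
    (PySem.Dict.getD d k []).length < wkC d := by
  unfold wkC
  rcases h : PySem.Dict.get? d k with _ | v
  · simp [PySem.Dict.getD_eq_get?_getD, h]
  · have hmem : (k, v) ∈ d.items := PySem.Dict.mem_items_of_get?_eq_some d h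
    have hv : v ∈ d.values := List.mem_map_of_mem hmem
    have hle : v.length ≤ (d.values.map List.length).sum :=
      List.single_le_sum (fun x _ => Nat.zero_le x) _ (List.mem_map_of_mem hv)
    simp [PySem.Dict.getD_eq_get?_getD, h]
    omega

-- iterative stack loop of B; each stack item carries fuel as a totality guard
-- (Source B's loop terminates on all Pre_ inputs; the fuel branch is never taken there)
def wkBloop (d : PySem.Dict String (List String)) :
    List (List String × Nat) → List (List String) → List (List String)
  | [], out => out
  | (p, f) :: rest, out =>
      if 1 < p.length && !PySem.Dict.contains d ((PySem.List.pyGet? p (-1)).getD "") then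
        wkBloop d rest (out ++ [p])
      else
        match f with
        | 0 => wkBloop d rest out
        | f + 1 =>
            wkBloop d ((PySem.Dict.getD d ((PySem.List.pyGet? p (-1)).getD "") []).map
              (fun t => (p ++ [t], f)) ++ rest) out
  termination_by stack _ => (stack.map (fun it => wkC d ^ it.2)).sum
  decreasing_by
  · have h0 : 0 < wkC d ^ f := Nat.pow_pos (by unfold wkC; omega)
    simp only [List.map_cons, List.sum_cons]
    omega
  · have h0 : 0 < wkC d ^ 0 := Nat.pow_pos (by unfold wkC; omega)
    simp only [List.map_cons, List.sum_cons]
    omega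
  · have h1 := wkC_targets_lt d ((PySem.List.pyGet? p (-1)).getD "")
    have h0 : 0 < wkC d ^ f := Nat.pow_pos (by unfold wkC; omega)
    simp only [List.map_append, List.map_map, List.sum_append, List.map_cons, List.sum_cons]
    have h2 : ((PySem.Dict.getD d ((PySem.List.pyGet? p (-1)).getD "") []).map (fun _ => wkC d ^ f)).sum
        = (PySem.Dict.getD d ((PySem.List.pyGet? p (-1)).getD "") []).length * wkC d ^ f := by simp
    have h4 : (PySem.Dict.getD d ((PySem.List.pyGet? p (-1)).getD "") []).length * wkC d ^ f < wkC d * wkC d ^ f :=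
      Nat.mul_lt_mul_of_pos_right h1 h0
    have h5 : wkC d * wkC d ^ f = wkC d ^ (f + 1) := by rw [pow_succ, Nat.mul_comm]
    calc ((PySem.Dict.getD d ((PySem.List.pyGet? p (-1)).getD "") []).map fun _ => wkC d ^ f).sum + (rest.map fun it => wkC d ^ it.2).sum
        < wkC d ^ (f + 1) + (rest.map fun it => wkC d ^ it.2).sum := by omega
      _ = _ := rfl

def walk_chain_py_alt (rel_dict : List (String × List String)) (from_id : String) : List (List String) :=
  wkBloop (PySem.Dict.ofList rel_dict) [([from_id], rel_dict.length + 1)] []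

-- ===== PRECONDITION & SPEC =====
-- helpers for Pre_: the graph with keys/nodes as character lists (cheap to decide), its
-- successor map (last binding wins, like a Python dict), and bounded breadth-first
-- reachability (a plain reachability check over the input graph, not either port's
-- enumeration)
def wkRelC (rel_dict : List (String × List String)) : List (List Char × List (List Char)) :=
  rel_dict.map (fun p => (p.1.toList, p.2.map String.toList))

def wkSuccC (rel : List (List Char × List (List Char))) (k : List Char) : List (List Char) :=
  (((rel.filter (fun p => p.1 == k)).getLast?).map (fun p => p.2)).getD []

def wkStepC (rel : List (List Char × List (List Char))) (S : List (List Char)) : List (List Char) :=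
  PySem.List.dedup (S ++ S.flatMap (wkSuccC rel))

def wkReachC (rel : List (List Char × List (List Char))) : Nat → List (List Char) → List (List Char)
  | 0, S => S
  | n + 1, S => wkReachC rel n (wkStepC rel S)

-- Pre_ = exactly the inputs where the Python A returns: from_id is a key and no node
-- reachable from from_id lies on a cycle (otherwise A raises KeyError / RecursionError).
def Pre_walk_chain_py (rel_dict : List (String × List String)) (from_id : String) : Prop :=
  from_id.toList ∈ (wkRelC rel_dict).map (fun p => p.1) ∧
  ∀ u ∈ wkReachC (wkRelC rel_dict) (rel_dict.length + 1) [from_id.toList],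
    u ∉ wkReachC (wkRelC rel_dict) (rel_dict.length + 1) (wkSuccC (wkRelC rel_dict) u)

instance (rel_dict : List (String × List String)) (from_id : String) : Decidable (Pre_walk_chain_py rel_dict from_id) := by unfold Pre_walk_chain_py; infer_instance

def pvWitness_walk_chain_py : (List (String × List String)) × String :=
  ([("a", ["b", "c"]), ("b", ["c"])], "a")

def Spec_walk_chain_py (rel_dict : List (String × List String)) (from_id : String) (out : List (List String)) : Prop := out = walk_chain_py_alt rel_dict from_id
instance (rel_dict : List (String × List String)) (from_id : String) (out : List (List String)) : Decidable (Spec_walk_chain_py rel_dict from_id out) := by unfold Spec_walk_chain_py; infer_instance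

-- ===== CLAIM (what is proved, stated in full; the proofs are below) =====
def Claim_equal_walk_chain_py : Prop := ∀ (rel_dict : List (String × List String)) (from_id : String), Dom_walk_chain_py rel_dict from_id → Pre_walk_chain_py rel_dict from_id → Spec_walk_chain_py rel_dict from_id (walk_chain_py rel_dict from_id)

-- ===== LEMMAS AND PROOFS =====

-- the list of completed paths an item (p, f) of B's stack eventually contributes
def wkG (d : PySem.Dict String (List String)) : Nat → List String → List (List String)
  | 0, p =>
      if 1 < p.length && !PySem.Dict.contains d ((PySem.List.pyGet? p (-1)).getD "") then [p]
      else []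
  | f + 1, p =>
      if 1 < p.length && !PySem.Dict.contains d ((PySem.List.pyGet? p (-1)).getD "") then [p]
      else (PySem.Dict.getD d ((PySem.List.pyGet? p (-1)).getD "") []).flatMap
            (fun t => wkG d f (p ++ [t]))

theorem wkG_emit (d : PySem.Dict String (List String)) (f : Nat) (p : List String)
    (h : (1 < p.length && !PySem.Dict.contains d ((PySem.List.pyGet? p (-1)).getD "")) = true) :
    wkG d f p = [p] := by
  cases f <;> simp [wkG, h]

theorem wkG_noemit_zero (d : PySem.Dict String (List String)) (p : List String)
    (h : (1 < p.length && !PySem.Dict.contains d ((PySem.List.pyGet? p (-1)).getD "")) = false) :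
    wkG d 0 p = [] := by
  simp [wkG, h]

theorem wkG_expand (d : PySem.Dict String (List String)) (f : Nat) (p : List String)
    (h : (1 < p.length && !PySem.Dict.contains d ((PySem.List.pyGet? p (-1)).getD "")) = false) :
    wkG d (f + 1) p = (PySem.Dict.getD d ((PySem.List.pyGet? p (-1)).getD "") []).flatMap
            (fun t => wkG d f (p ++ [t])) := by
  simp [wkG, h]

-- loop invariant: the loop returns out followed by each stack item's contribution, in order
theorem wkBloop_eq (d : PySem.Dict String (List String)) :
    ∀ stack out, wkBloop d stack out = out ++ stack.flatMap (fun it => wkG d it.2 it.1) := by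
  intro stack out
  fun_induction wkBloop d stack out <;>
    simp_all [List.flatMap_cons, List.flatMap_append, List.flatMap_map]
  · rename_i p f rest out h ih
    rw [wkG_emit d f p (by simp [h.1, h.2])]
    simp
  · rename_i p rest out h ih
    exact wkG_noemit_zero d p (by simp_all)
  · rename_i p rest out f h ih
    rw [wkG_expand d f p (by simp_all)]

-- distribute the per-iteration if over the append accumulated by A's inner loop
theorem wk_foldl_ite_append {α β : Type} (l : List α) (c : α → Bool) (f g : α → List β)
    (acc : List β) :
    l.foldl (fun a x => if c x then a ++ f x else a ++ g x) acc
      = acc ++ l.flatMap (fun x => if c x then f x else g x) := by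
  have hb : (fun (a : List β) x => if c x then a ++ f x else a ++ g x)
      = fun a x => a ++ (if c x then f x else g x) := by
    funext a x; split <;> rfl
  rw [hb, PySem.List.foldl_append_eq_flatMap]

-- each stack item whose last node is expandable contributes exactly A's chains, prefixed
theorem wkG_eq_wkA (d : PySem.Dict String (List String)) :
    ∀ (f : Nat) (p : List String) (u : String),
      (p = [] ∨ PySem.Dict.contains d u = true) →
      wkG d f (p ++ [u]) = (wkA d f u).map (fun tail => p ++ tail) := by
  intro f
  induction f with
  | zero =>
      intro p u h
      apply wkG_noemit_zero
      rcases h with h | h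
      · subst h; simp
      · simp [PySem.List.pyGet?_neg_one_append_singleton, h]
  | succ f ih =>
      intro p u h
      have hc : (1 < (p ++ [u]).length &&
          !PySem.Dict.contains d ((PySem.List.pyGet? (p ++ [u]) (-1)).getD "")) = false := by
        rcases h with h | h
        · subst h; simp
        · simp [PySem.List.pyGet?_neg_one_append_singleton, h]
      rw [wkG_expand d f (p ++ [u]) hc]
      simp only [PySem.List.pyGet?_neg_one_append_singleton, Option.getD_some]
      show _ = (wkA d (f + 1) u).map (fun tail => p ++ tail)
      rw [wkA, wk_foldl_ite_append]
      simp only [List.nil_append, List.map_flatMap]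
      have hfun : ∀ t, wkG d f ((p ++ [u]) ++ [t])
          = ((if PySem.Dict.contains d t then (wkA d f t).map (fun tail => u :: tail)
              else [[u, t]]).map (fun tail => p ++ tail)) := by
        intro t
        by_cases hct : PySem.Dict.contains d t = true
        · rw [ih (p ++ [u]) t (Or.inr hct)]
          simp [hct, List.map_map, Function.comp_def]
        · have hcf : PySem.Dict.contains d t = false := by
            simpa using hct
          rw [wkG_emit d f ((p ++ [u]) ++ [t])
            (by
              simp only [PySem.List.pyGet?_neg_one_append_singleton, Option.getD_some, hcf]
              simp [List.length_append])]
          simp [hcf, List.append_assoc]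
      simp only [hfun]

-- ===== VERDICT (by name: the statement is the Claim_ definition above) =====
theorem walk_chain_py_spec : Claim_equal_walk_chain_py := by
  intro rel_dict from_id _ _
  unfold Spec_walk_chain_py walk_chain_py walk_chain_py_alt
  rw [wkBloop_eq]
  have h := wkG_eq_wkA (PySem.Dict.ofList rel_dict) (rel_dict.length + 1) [] from_id (Or.inl rfl)
  simp only [List.nil_append] at h
  simp [h]
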